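-- pv_equiv track=rewrite | github.com/Est17256/LAB2-Redes-Deteccion-Errores | receptor.py | recepcionCRC32
-- ===== SOURCE A (Python) =====
-- def sumarSegmentos(segmento1, segmento2):
--     carrier = '0'
--     suma = ''
--
--     for item in range(7,-1,-1):
--         a = int(segmento1[item])
--         b = int(segmento2[item])
--
--         resultadoAB = a + b + int(carrier)
--         if resultadoAB == 0:
--             suma = '0' + suma
--             carrier = '0'
--         elif resultadoAB == 1:
--             suma = '1' + suma
--             carrier = '0'
--         elif resultadoAB == 2:
--             suma = '0' + suma
--             carrier = '1'
--         elif resultadoAB == 3: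
--             suma = '1' + suma
--             carrier = '1'
--
--     if carrier != '0':
--         suma = carrier + suma
--     return suma
--
-- def recepcionCRC32(binario):
--     n = 8
--     arrayBinary = [binario[i:i+n] for i in range(0, len(binario), n)]
--     arrayBinary.pop()
--     sumaSegmentos = '00000000'
--
--     for i in arrayBinary:
--         sumaSegmentos = sumarSegmentos(sumaSegmentos, i)
--
--         if len(sumaSegmentos) > 8:
--             sumaSegmentos = sumaSegmentos[1:]
--             sumaSegmentos = sumarSegmentos(sumaSegmentos, '00000001')
--
--     return sumaSegmentos
-- ===== SOURCE B (Python) =====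
-- def recepcionCRC32(binario):
--     n = 8
--     arrayBinary = [binario[i:i+n] for i in range(0, len(binario), n)]
--     arrayBinary.pop()
--     total = 0
--     for seg in arrayBinary:
--         total += int(seg, 2)
--     while total > 0xFF:
--         total = (total & 0xFF) + (total >> 8)
--     return format(total, '08b')
-- ===== Notes on version B (the rewrite author's own statement) =====
-- stated objective: simpler
-- what changed: B replaces A's per-bit string addition (char-by-char ripple carry building strings, with an immediate end-around-carry fix after each segment) by plain integer arithmetic: each 8-bit chunk is parsed with int(seg,2) into one running total, the end-around carry is folded once after the loop, and the result is formatted back as 8 zero-padded binary digits; exact because one's-complement addition is associative.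
-- outside the precondition, e.g. on recepcionCRC32('200000000'): A returns '00000001', B raises ValueError
import Mathlib
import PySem

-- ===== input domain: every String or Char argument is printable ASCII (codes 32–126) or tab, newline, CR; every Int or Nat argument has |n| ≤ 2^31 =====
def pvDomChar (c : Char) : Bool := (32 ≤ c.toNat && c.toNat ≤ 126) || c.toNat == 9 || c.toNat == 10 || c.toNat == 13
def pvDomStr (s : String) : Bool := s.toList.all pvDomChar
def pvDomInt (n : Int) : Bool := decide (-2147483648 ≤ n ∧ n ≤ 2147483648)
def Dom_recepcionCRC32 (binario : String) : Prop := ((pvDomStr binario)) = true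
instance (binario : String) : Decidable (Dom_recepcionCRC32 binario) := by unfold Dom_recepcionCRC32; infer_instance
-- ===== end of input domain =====

-- B computes the same 8-bit one's-complement checksum with integer arithmetic and one deferred
-- end-around-carry fold instead of A's per-bit string addition and per-segment carry fix.

-- ===== PORT A =====
-- int(c) for a single digit char (exact for '0'..'9'; on other chars Python raises ValueError — outside Pre_)
def pvIntChar (c : Char) : Int := (c.toNat : Int) - 48

-- body of the 'for item in range(7,-1,-1)' loop; strings are List Char, the one-char carrier a Char
def pvPasoA (segmento1 segmento2 : List Char) (st : Char × List Char) (item : Int) : Char × List Char :=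
  let a := pvIntChar (PySem.List.pyGetD segmento1 item ' ')   -- IndexError only outside Pre_
  let b := pvIntChar (PySem.List.pyGetD segmento2 item ' ')
  let resultadoAB := a + b + pvIntChar st.1
  if resultadoAB = 0 then ('0', '0' :: st.2)
  else if resultadoAB = 1 then ('0', '1' :: st.2)
  else if resultadoAB = 2 then ('1', '0' :: st.2)
  else if resultadoAB = 3 then ('1', '1' :: st.2)
  else st

def sumarSegmentos (segmento1 segmento2 : List Char) : List Char :=
  let st := (PySem.List.pyRange 7 (-1) (-1)).foldl (pvPasoA segmento1 segmento2) ('0', ([] : List Char))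
  if st.1 ≠ '0' then st.1 :: st.2 else st.2

-- body of the 'for i in arrayBinary' loop
def pvCuerpoA (sumaSegmentos segmento : List Char) : List Char :=
  let s := sumarSegmentos sumaSegmentos segmento
  if 8 < PySem.List.len s then
    sumarSegmentos (PySem.List.slice s (some 1) none) ['0','0','0','0','0','0','0','1']
  else s

def recepcionCRC32 (binario : String) : String :=
  let l := binario.toList
  let arrayBinary := (PySem.List.pyRange 0 (PySem.List.len l) 8).map
      (fun i => PySem.List.slice l (some i) (some (i + 8)))
  let arrayBinary := match PySem.List.pop? arrayBinary with
      | some (_, rest) => rest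
      | none => []                    -- .pop() on []: IndexError, outside Pre_
  let suma := arrayBinary.foldl pvCuerpoA ['0','0','0','0','0','0','0','0']
  String.ofList suma

-- ===== PORT B =====
-- 'while total > 0xFF: total = (total & 0xFF) + (total >> 8)'; on these nonnegative totals
-- '& 0xFF' is '% 256' and '>> 8' is '/ 256'
def pvFoldCarry (total : Nat) : Nat :=
  if h : 255 < total then pvFoldCarry (total % 256 + total / 256) else total
termination_by total
decreasing_by omega

def recepcionCRC32_alt (binario : String) : String :=
  let l := binario.toList
  let arrayBinary := (PySem.List.pyRange 0 (PySem.List.len l) 8).map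
      (fun i => PySem.List.slice l (some i) (some (i + 8)))
  let arrayBinary := match PySem.List.pop? arrayBinary with
      | some (_, rest) => rest
      | none => []                    -- .pop() on []: IndexError, outside Pre_
  -- int(seg, 2); none = ValueError, outside Pre_ (under Pre_ every summed chunk is binary)
  let total := arrayBinary.foldl (fun total seg => total + (PySem.Int.ofCharsBase? seg 2).getD 0) (0 : Int)
  let total := pvFoldCarry total.toNat
  -- format(total, '08b')
  String.ofList (List.replicate (8 - (PySem.Int.toBinChars (total : Int)).length) '0'
             ++ PySem.Int.toBinChars (total : Int))

-- ===== PRECONDITION & SPEC =====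
-- Pre_ excludes the empty string, where A's pop() raises IndexError, and any non-'0'/'1' character
-- among the summed chunks (all chunks but the last): digit chars 2-9 there make A's four-way bit
-- branch silently skip bits and return a malformed string while B's int(seg,2) raises ValueError,
-- and any other character makes both raise ValueError.
def Pre_recepcionCRC32 (binario : String) : Prop :=
  binario.toList ≠ [] ∧
  ∀ i < 8 * ((binario.toList.length - 1) / 8),
    binario.toList.getD i ' ' = '0' ∨ binario.toList.getD i ' ' = '1'
instance (binario : String) : Decidable (Pre_recepcionCRC32 binario) := by
  unfold Pre_recepcionCRC32; infer_instance

def pvWitness_recepcionCRC32 : String := "0000000100000010"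

def Spec_recepcionCRC32 (binario : String) (out : String) : Prop := out = recepcionCRC32_alt binario
instance (binario : String) (out : String) : Decidable (Spec_recepcionCRC32 binario out) := by
  unfold Spec_recepcionCRC32; infer_instance

-- ===== CLAIM (what is proved, stated in full; the proofs are below) =====
def Claim_equal_recepcionCRC32 : Prop := ∀ (binario : String), Dom_recepcionCRC32 binario → Pre_recepcionCRC32 binario → Spec_recepcionCRC32 binario (recepcionCRC32 binario)

-- ===== LEMMAS AND PROOFS =====

-- value of a bit char / of a big-endian bit string
def pvBitv (c : Char) : Nat := if c = '1' then 1 else 0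
def pvVal (l : List Char) : Nat := l.foldl (fun a c => 2 * a + pvBitv c) 0
def pvBit (t : Nat) : Char := if t % 2 = 1 then '1' else '0'
-- the k low bits of t, big-endian
def pvBits : Nat → Nat → List Char
  | 0, _ => []
  | k+1, t => pvBits k (t / 2) ++ [pvBit t]
-- end-around-carry reduction into [0,255] in closed form
def pvG (x : Nat) : Nat := if x = 0 then 0 else (x - 1) % 255 + 1

theorem pvVal_foldl (l : List Char) (a : Nat) :
    l.foldl (fun a c => 2 * a + pvBitv c) a = a * 2 ^ l.length + pvVal l := by
  induction l generalizing a with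
  | nil => simp [pvVal]
  | cons c l ih =>
    show List.foldl _ (2 * a + pvBitv c) l = _
    rw [ih]
    have h2 : pvVal (c :: l) = List.foldl (fun a c => 2 * a + pvBitv c) (2 * 0 + pvBitv c) l := rfl
    rw [h2, ih]
    simp [List.length_cons, pow_succ]
    ring

theorem pvVal_cons (c : Char) (l : List Char) :
    pvVal (c :: l) = pvBitv c * 2 ^ l.length + pvVal l := by
  have h2 : pvVal (c :: l) = List.foldl (fun a c => 2 * a + pvBitv c) (2 * 0 + pvBitv c) l := rfl
  rw [h2, pvVal_foldl]
  ring

theorem pvVal_append (l : List Char) (c : Char) :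
    pvVal (l ++ [c]) = 2 * pvVal l + pvBitv c := by
  simp [pvVal, List.foldl_append]

theorem pvVal_lt (l : List Char) : pvVal l < 2 ^ l.length := by
  induction l with
  | nil => simp [pvVal]
  | cons c l ih =>
    rw [pvVal_cons, List.length_cons, pow_succ]
    by_cases hc : c = '1' <;> simp [pvBitv, hc] <;> omega

theorem length_pvBits (k t : Nat) : (pvBits k t).length = k := by
  induction k generalizing t with
  | zero => rfl
  | succ k ih => simp [pvBits, ih]

theorem binary_pvBits (k t : Nat) : ∀ c ∈ pvBits k t, c = '0' ∨ c = '1' := by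
  induction k generalizing t with
  | zero => simp [pvBits]
  | succ k ih =>
    intro c hc
    simp only [pvBits, List.mem_append, List.mem_singleton] at hc
    rcases hc with hc | rfl
    · exact ih _ c hc
    · unfold pvBit; split <;> simp

theorem pvVal_pvBits (k t : Nat) : pvVal (pvBits k t) = t % 2 ^ k := by
  induction k generalizing t with
  | zero => simp [pvBits, pvVal, Nat.mod_one]
  | succ k ih =>
    show pvVal (pvBits k (t / 2) ++ [pvBit t]) = _
    rw [pvVal_append, ih]
    have hb : pvBitv (pvBit t) = t % 2 := by
      rcases Nat.mod_two_eq_zero_or_one t with h | h <;> simp [pvBitv, pvBit, h]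
    rw [hb, pow_succ', Nat.mod_mul]
    omega

theorem pvBits_succ_front (k t : Nat) : pvBits (k+1) t = pvBit (t / 2 ^ k) :: pvBits k t := by
  induction k generalizing t with
  | zero => simp [pvBits]
  | succ k ih =>
    show pvBits (k+1) (t / 2) ++ [pvBit t] = pvBit (t / 2 ^ (k+1)) :: (pvBits k (t / 2) ++ [pvBit t])
    rw [ih, Nat.div_div_eq_div_mul, ← pow_succ']
    simp

theorem pvBits_add_mul_pow (k t x : Nat) : pvBits k (t + x * 2 ^ k) = pvBits k t := by
  induction k generalizing t x with
  | zero => rfl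
  | succ k ih =>
    show pvBits k ((t + x * 2 ^ (k+1)) / 2) ++ [pvBit (t + x * 2 ^ (k+1))] = pvBits k (t / 2) ++ [pvBit t]
    have hmul : x * 2 ^ (k+1) = 2 * (x * 2 ^ k) := by rw [pow_succ']; ring
    have hdiv : (t + x * 2 ^ (k+1)) / 2 = t / 2 + x * 2 ^ k := by rw [hmul]; omega
    have hmod : pvBit (t + x * 2 ^ (k+1)) = pvBit t := by
      unfold pvBit; rw [hmul]
      rcases Nat.mod_two_eq_zero_or_one t with h | h <;>
        rw [show (t + 2 * (x * 2 ^ k)) % 2 = t % 2 from by omega, h]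
    rw [hdiv, ih, hmod]

theorem pvG_le (x : Nat) : pvG x ≤ 255 := by unfold pvG; split <;> omega

theorem pvG_eq_self {x : Nat} (h : x ≤ 255) : pvG x = x := by unfold pvG; split <;> omega

theorem pvG_pvG_add (a b : Nat) : pvG (pvG a + b) = pvG (a + b) := by
  unfold pvG; split_ifs <;> omega

theorem pvFoldCarry_eq_pvG (t : Nat) : pvFoldCarry t = pvG t := by
  induction t using Nat.strong_induction_on with
  | _ t ih =>
    unfold pvFoldCarry
    split
    · next h =>
      rw [ih _ (by omega)]
      unfold pvG; split_ifs <;> omega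
    · next h => exact (pvG_eq_self (by omega)).symm

theorem pvG_foldl (l : List Nat) (s : Nat) :
    l.foldl (fun a v => pvG (a + v)) (pvG s) = pvG (s + l.sum) := by
  induction l generalizing s with
  | nil => simp
  | cons v l ih =>
    simp only [List.foldl_cons, List.sum_cons, pvG_pvG_add]
    rw [ih (s + v)]; ring_nf

theorem pvBits_val (l : List Char) (hb : ∀ c ∈ l, c = '0' ∨ c = '1') :
    pvBits l.length (pvVal l) = l := by
  induction l using List.reverseRecOn with
  | nil => rfl
  | append_singleton l c ih =>
    have hl : (l ++ [c]).length = l.length + 1 := by simp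
    rw [hl]
    show pvBits l.length (pvVal (l ++ [c]) / 2) ++ [pvBit (pvVal (l ++ [c]))] = l ++ [c]
    have hv := pvVal_append l c
    have hrec := ih (fun x hx => hb x (by simp [hx]))
    rcases hb c (by simp) with rfl | rfl
    · have hb0 : pvBitv '0' = 0 := by decide
      rw [hb0] at hv
      have h2 : pvVal (l ++ ['0']) / 2 = pvVal l := by omega
      have hm : pvVal (l ++ ['0']) % 2 = 0 := by omega
      have h3 : pvBit (pvVal (l ++ ['0'])) = '0' := by unfold pvBit; rw [hm]; norm_num
      rw [h2, h3, hrec]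
    · have hb1 : pvBitv '1' = 1 := by decide
      rw [hb1] at hv
      have h2 : pvVal (l ++ ['1']) / 2 = pvVal l := by omega
      have hm : pvVal (l ++ ['1']) % 2 = 1 := by omega
      have h3 : pvBit (pvVal (l ++ ['1'])) = '1' := by unfold pvBit; rw [hm]; norm_num
      rw [h2, h3, hrec]

theorem bits_shift (m S x : Nat) :
    pvBits (m+1) (x * 2 ^ m + S) = pvBit (x + S / 2 ^ m) :: pvBits m S := by
  rw [pvBits_succ_front]
  have hd : (x * 2 ^ m + S) / 2 ^ m = x + S / 2 ^ m := by
    rw [show x * 2 ^ m + S = 2 ^ m * x + S from by ring,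
      Nat.mul_add_div (Nat.two_pow_pos m)]
  have hb : pvBits m (x * 2 ^ m + S) = pvBits m S := by
    rw [show x * 2 ^ m + S = S + x * 2 ^ m from by ring, pvBits_add_mul_pow]
  rw [hd, hb]

-- the inner loop of sumarSegmentos, characterised
theorem sumar_inv (s1 s2 : List Char) (h1 : s1.length = 8) (h2 : s2.length = 8)
    (hb1 : ∀ c ∈ s1, c = '0' ∨ c = '1') (hb2 : ∀ c ∈ s2, c = '0' ∨ c = '1')
    (m : Nat) (hm : m ≤ 8) :
    (List.range m).foldl (fun (st : Char × List Char) (k : Nat) => pvPasoA s1 s2 st (7 - (k : Int))) ('0', ([] : List Char)) =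
      ((if 2 ^ m ≤ pvVal (s1.drop (8 - m)) + pvVal (s2.drop (8 - m)) then '1' else '0'),
        pvBits m (pvVal (s1.drop (8 - m)) + pvVal (s2.drop (8 - m)))) := by
  induction m with
  | zero =>
    have e1 : s1.drop (8 - 0) = [] := by rw [show (8:Nat) - 0 = 8 from rfl, ← h1]; exact List.drop_length
    have e2 : s2.drop (8 - 0) = [] := by rw [show (8:Nat) - 0 = 8 from rfl, ← h2]; exact List.drop_length
    norm_num [e1, e2, pvVal, pvBits]
  | succ m ih =>
    have hm7 : m ≤ 7 := by omega
    rw [List.range_succ, List.foldl_append, ih (by omega), List.foldl_cons, List.foldl_nil]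
    have hlt1 : 7 - m < s1.length := by omega
    have hlt2 : 7 - m < s2.length := by omega
    have hidx : (7 - (m : Int)) = (((7 - m : Nat)) : Int) := by omega
    have hget1 : PySem.List.pyGetD s1 (7 - (m : Int)) ' ' = s1[7-m] := by
      rw [hidx, PySem.List.pyGetD_natCast, List.getD_eq_getElem _ _ hlt1]
    have hget2 : PySem.List.pyGetD s2 (7 - (m : Int)) ' ' = s2[7-m] := by
      rw [hidx, PySem.List.pyGetD_natCast, List.getD_eq_getElem _ _ hlt2]
    have hdrop1 : s1.drop (8 - (m+1)) = s1[7-m] :: s1.drop (8 - m) := by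
      rw [show 8 - (m+1) = 7 - m from by omega]
      rw [List.drop_eq_getElem_cons hlt1, show 7 - m + 1 = 8 - m from by omega]
    have hdrop2 : s2.drop (8 - (m+1)) = s2[7-m] :: s2.drop (8 - m) := by
      rw [show 8 - (m+1) = 7 - m from by omega]
      rw [List.drop_eq_getElem_cons hlt2, show 7 - m + 1 = 8 - m from by omega]
    have hlen1 : (s1.drop (8-m)).length = m := by simp [h1]; omega
    have hlen2 : (s2.drop (8-m)).length = m := by simp [h2]; omega
    have hv1' : pvVal (s1.drop (8-(m+1))) = pvBitv s1[7-m] * 2 ^ m + pvVal (s1.drop (8-m)) := by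
      rw [hdrop1, pvVal_cons, hlen1]
    have hv2' : pvVal (s2.drop (8-(m+1))) = pvBitv s2[7-m] * 2 ^ m + pvVal (s2.drop (8-m)) := by
      rw [hdrop2, pvVal_cons, hlen2]
    have hv1lt : pvVal (s1.drop (8-m)) < 2 ^ m := by
      have := pvVal_lt (s1.drop (8-m)); rwa [hlen1] at this
    have hv2lt : pvVal (s2.drop (8-m)) < 2 ^ m := by
      have := pvVal_lt (s2.drop (8-m)); rwa [hlen2] at this
    have hsum : pvVal (s1.drop (8-(m+1))) + pvVal (s2.drop (8-(m+1))) =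
        (pvBitv s1[7-m] + pvBitv s2[7-m]) * 2 ^ m
          + (pvVal (s1.drop (8-m)) + pvVal (s2.drop (8-m))) := by
      rw [hv1', hv2']; ring
    rw [hsum, bits_shift m _ _]
    have hdivsum : (pvVal (s1.drop (8-m)) + pvVal (s2.drop (8-m))) / 2 ^ m =
        if 2 ^ m ≤ pvVal (s1.drop (8-m)) + pvVal (s2.drop (8-m)) then 1 else 0 := by
      have hp := Nat.two_pow_pos m
      split
      · next h => exact Nat.div_eq_of_lt_le (by omega) (by omega)
      · next h => exact Nat.div_eq_of_lt (by omega)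
    have hpow : (2:Nat) ^ (m+1) = 2 * 2 ^ m := by rw [pow_succ]; ring
    have i0 : pvIntChar '0' = 0 := by decide
    have i1 : pvIntChar '1' = 1 := by decide
    have b0 : pvBitv '0' = 0 := by decide
    have b1 : pvBitv '1' = 1 := by decide
    have hp := Nat.two_pow_pos m
    rcases hb1 _ (List.getElem_mem hlt1) with hc1 | hc1 <;>
      rcases hb2 _ (List.getElem_mem hlt2) with hc2 | hc2 <;>
      by_cases hcar : 2 ^ m ≤ pvVal (s1.drop (8-m)) + pvVal (s2.drop (8-m)) <;>
      simp only [pvPasoA, hget1, hget2, hc1, hc2, i0, i1, b0, b1, hcar, hdivsum, hpow,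
        if_true, if_false] <;>
      norm_num [pvBit] <;>
      simp_all <;>
      omega

theorem sumar_correct (s1 s2 : List Char) (h1 : s1.length = 8) (h2 : s2.length = 8)
    (hb1 : ∀ c ∈ s1, c = '0' ∨ c = '1') (hb2 : ∀ c ∈ s2, c = '0' ∨ c = '1') :
    sumarSegmentos s1 s2 =
      if 256 ≤ pvVal s1 + pvVal s2 then '1' :: pvBits 8 (pvVal s1 + pvVal s2)
      else pvBits 8 (pvVal s1 + pvVal s2) := by
  simp only [sumarSegmentos]
  have hr : PySem.List.pyRange 7 (-1) (-1) = (List.range 8).map (fun (k : Nat) => 7 - (k : Int)) := by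
    rw [PySem.List.pyRange_neg_one]; rfl
  rw [hr, List.foldl_map]
  have hinv := sumar_inv s1 s2 h1 h2 hb1 hb2 8 (by omega)
  rw [show (8:Nat) - 8 = 0 from rfl, List.drop_zero, List.drop_zero] at hinv
  rw [hinv]
  by_cases hc : 256 ≤ pvVal s1 + pvVal s2 <;>
    simp [show (2:Nat)^8 = 256 from by norm_num, hc]

theorem cuerpo_correct (t : Nat) (ht : t ≤ 255) (seg : List Char) (hlen : seg.length = 8)
    (hb : ∀ c ∈ seg, c = '0' ∨ c = '1') :
    pvCuerpoA (pvBits 8 t) seg = pvBits 8 (pvG (t + pvVal seg)) := by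
  have hlb := length_pvBits 8 t
  have hbb := binary_pvBits 8 t
  have h256 : (2:Nat)^8 = 256 := by norm_num
  have hval : pvVal (pvBits 8 t) = t := by
    rw [pvVal_pvBits, h256]; omega
  have hvlt : pvVal seg < 256 := by
    have := pvVal_lt seg; rwa [hlen, h256] at this
  simp only [pvCuerpoA]
  rw [sumar_correct _ _ hlb hlen hbb hb, hval]
  by_cases hc : 256 ≤ t + pvVal seg
  · rw [if_pos hc]
    rw [show PySem.List.len ('1' :: pvBits 8 (t + pvVal seg)) = 9 from by
      simp [PySem.List.len_eq, length_pvBits]]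
    rw [if_pos (by norm_num)]
    rw [PySem.List.slice_from_one, List.tail_cons]
    have h01 : (['0','0','0','0','0','0','0','1'] : List Char) = pvBits 8 1 := by decide
    rw [h01, sumar_correct _ _ (length_pvBits 8 _) (length_pvBits 8 _)
      (binary_pvBits 8 _) (binary_pvBits 8 _)]
    rw [pvVal_pvBits, pvVal_pvBits, h256]
    have hm : (t + pvVal seg) % 256 ≤ 254 := by omega
    rw [if_neg (by omega)]
    congr 1
    unfold pvG
    split <;> omega
  · rw [if_neg hc]
    rw [show PySem.List.len (pvBits 8 (t + pvVal seg)) = 8 from by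
      simp [PySem.List.len_eq, length_pvBits]]
    rw [if_neg (by norm_num)]
    rw [pvG_eq_self (by omega)]

theorem foldA_correct (chunks : List (List Char))
    (h : ∀ seg ∈ chunks, seg.length = 8 ∧ ∀ c ∈ seg, c = '0' ∨ c = '1') :
    ∀ t ≤ 255, chunks.foldl pvCuerpoA (pvBits 8 t) =
      pvBits 8 (chunks.foldl (fun a seg => pvG (a + pvVal seg)) t) := by
  induction chunks with
  | nil => intro t ht; rfl
  | cons seg chunks ih =>
    intro t ht
    have hs := h seg (by simp)
    rw [List.foldl_cons, List.foldl_cons, cuerpo_correct t ht seg hs.1 hs.2]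
    exact ih (fun s hsm => h s (by simp [hsm])) _ (pvG_le _)

set_option maxRecDepth 8192 in
theorem int2_256 : ∀ t < 256, PySem.Int.ofCharsBase? (pvBits 8 t) 2 = some ((t : Nat) : Int) := by
  decide

theorem int2_eq_val (seg : List Char) (hlen : seg.length = 8)
    (hb : ∀ c ∈ seg, c = '0' ∨ c = '1') :
    PySem.Int.ofCharsBase? seg 2 = some ((pvVal seg : Nat) : Int) := by
  have h := pvBits_val seg hb
  rw [hlen] at h
  have hvlt : pvVal seg < 256 := by
    have := pvVal_lt seg; rw [hlen] at this; norm_num at this; exact this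
  calc PySem.Int.ofCharsBase? seg 2
      = PySem.Int.ofCharsBase? (pvBits 8 (pvVal seg)) 2 := by rw [h]
    _ = some ((pvVal seg : Nat) : Int) := int2_256 _ hvlt

set_option maxRecDepth 8192 in
theorem format_eq_pvBits : ∀ t < 256,
    List.replicate (8 - (PySem.Int.toBinChars ((t : Nat) : Int)).length) '0'
      ++ PySem.Int.toBinChars ((t : Nat) : Int) = pvBits 8 t := by
  decide

-- ===== VERDICT (by name: the statement is the Claim_ definition above) =====
theorem recepcionCRC32_spec : Claim_equal_recepcionCRC32 := by
  intro binario _ hPre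
  obtain ⟨hne, hbin⟩ := hPre
  unfold Spec_recepcionCRC32
  simp only [recepcionCRC32, recepcionCRC32_alt]
  set l := binario.toList with hl
  have hL : 1 ≤ l.length := List.length_pos_of_ne_nil hne
  set m := (l.length + 7) / 8 with hm
  have hm1 : 1 ≤ m := by omega
  -- the chunk list [binario[i:i+8] for i in range(0, len(binario), 8)]
  have hrange : PySem.List.pyRange 0 (PySem.List.len l) 8 =
      (List.range m).map (fun (k : Nat) => ((8*k : Nat) : Int)) := by
    rw [PySem.List.len_eq, PySem.List.pyRange_of_pos 0 ((l.length : Nat) : Int) (s := 8) (by norm_num)]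
    have hcount : (if (0:Int) < (l.length : Int) then
        (((l.length : Int) - 0 + 8 - 1) / 8).toNat else 0) = m := by
      rw [if_pos (by exact_mod_cast hL)]
      omega
    rw [hcount]
    apply List.map_congr_left
    intro k _
    push_cast
    ring
  have hslice : ∀ k : Nat, 8*k + 8 ≤ l.length →
      PySem.List.slice l (some ((8*k : Nat) : Int)) (some (((8*k : Nat) : Int) + 8)) =
        (l.drop (8*k)).take 8 := by
    intro k _
    rw [show (((8*k : Nat) : Int) + 8) = (((8*k + 8 : Nat)) : Int) from by push_cast; ring,
      PySem.List.slice_natCast]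
    congr 1
    omega
  have hchunks : (List.range m).map
        (fun (k : Nat) => PySem.List.slice l (some ((8*k : Nat) : Int)) (some (((8*k : Nat) : Int) + 8)))
      = (List.range (m-1)).map
          (fun (k : Nat) => PySem.List.slice l (some ((8*k : Nat) : Int)) (some (((8*k : Nat) : Int) + 8)))
        ++ [PySem.List.slice l (some ((8*(m-1) : Nat) : Int)) (some (((8*(m-1) : Nat) : Int) + 8))] := by
    conv_lhs => rw [show m = m - 1 + 1 from by omega]
    rw [List.range_succ, List.map_append, List.map_singleton]
  have hpop : PySem.List.pop? ((List.range m).map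
        (fun (k : Nat) => PySem.List.slice l (some ((8*k : Nat) : Int)) (some (((8*k : Nat) : Int) + 8))))
      = some (PySem.List.slice l (some ((8*(m-1) : Nat) : Int)) (some (((8*(m-1) : Nat) : Int) + 8)),
          (List.range (m-1)).map
            (fun (k : Nat) => PySem.List.slice l (some ((8*k : Nat) : Int)) (some (((8*k : Nat) : Int) + 8)))) := by
    rw [hchunks, PySem.List.pop?_last]
  simp only [hrange, List.map_map, Function.comp_def]
  simp only [hpop]
  -- the processed chunks, in drop/take form
  have h8m : 8 * (m - 1) ≤ l.length := by omega
  have hP : (List.range (m-1)).map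
        (fun (k : Nat) => PySem.List.slice l (some ((8*k : Nat) : Int)) (some (((8*k : Nat) : Int) + 8)))
      = (List.range (m-1)).map (fun (k : Nat) => (l.drop (8*k)).take 8) := by
    apply List.map_congr_left
    intro k hk
    rw [List.mem_range] at hk
    exact hslice k (by omega)
  rw [hP]
  have hch : ∀ seg ∈ (List.range (m-1)).map (fun (k : Nat) => (l.drop (8*k)).take 8),
      seg.length = 8 ∧ ∀ c ∈ seg, c = '0' ∨ c = '1' := by
    intro seg hseg
    obtain ⟨k, hk, rfl⟩ := List.mem_map.mp hseg
    rw [List.mem_range] at hk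
    have hkk : 8*k + 8 ≤ 8 * (m - 1) := by omega
    constructor
    · simp
      omega
    · intro c hc
      obtain ⟨j, hj, rfl⟩ := List.mem_iff_getElem.mp hc
      have hj8 : j < 8 := by
        have h2 := hj
        simp [List.length_take, List.length_drop] at h2
        omega
      have hidx : 8*k + j < 8 * ((l.length - 1) / 8) := by omega
      have hlt : 8*k + j < l.length := by omega
      have := hbin (8*k + j) hidx
      rw [List.getD_eq_getElem _ _ hlt] at this
      simpa [List.getElem_take, List.getElem_drop] using this
  set P := (List.range (m-1)).map (fun (k : Nat) => (l.drop (8*k)).take 8) with hPdef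
  -- A's loop = g-fold on chunk values
  have hA : P.foldl pvCuerpoA ['0','0','0','0','0','0','0','0'] =
      pvBits 8 (P.foldl (fun a seg => pvG (a + pvVal seg)) 0) := by
    have h0 : (['0','0','0','0','0','0','0','0'] : List Char) = pvBits 8 0 := by decide
    rw [h0]
    exact foldA_correct P hch 0 (by omega)
  -- the stepwise g-fold is g of the plain sum
  have hgf : P.foldl (fun a seg => pvG (a + pvVal seg)) 0 = pvG ((P.map pvVal).sum) := by
    have h0 : pvG 0 = 0 := rfl
    have hx := pvG_foldl (P.map pvVal) 0
    simpa [List.foldl_map, h0] using hx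
  -- B's running total is the plain sum
  have hB : P.foldl (fun total seg => total + (PySem.Int.ofCharsBase? seg 2).getD 0) (0:Int)
      = (((P.map pvVal).sum : Nat) : Int) := by
    rw [PySem.List.foldl_add (g := fun seg => (PySem.Int.ofCharsBase? seg 2).getD 0)]
    have hmapeq : P.map (fun seg => (PySem.Int.ofCharsBase? seg 2).getD 0)
        = P.map (fun seg => ((pvVal seg : Nat) : Int)) := by
      apply List.map_congr_left
      intro seg hseg
      rw [int2_eq_val seg (hch seg hseg).1 (fun c hc => (hch seg hseg).2 c hc)]
      rfl
    rw [hmapeq]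
    push_cast [List.map_map]
    simp [Function.comp_def]
  rw [hA, hgf, hB, Int.toNat_natCast, pvFoldCarry_eq_pvG]
  rw [format_eq_pvBits ((P.map pvVal).sum |> pvG) (by have := pvG_le ((P.map pvVal).sum); omega)]
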